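-- pv_equiv track=rewrite | github.com/lordlol13/pdads_mpv | app/backend/services/news_api_service.py | _preferred_domains_for_countries
-- ===== SOURCE A (Python) =====
-- COUNTRY_NEWS_DOMAINS: dict[str, list[str]] = {
--     "UZ": ["kun.uz", "gazeta.uz", "daryo.uz", "uznews.uz"],
--     "RU": ["ria.ru", "rbc.ru", "lenta.ru", "vesti.ru"],
--     "KZ": ["tengrinews.kz", "inform.kz"],
--     "US": ["apnews.com", "reuters.com", "cnn.com"],
-- }
--
-- def _preferred_domains_for_countries(country_codes: list[str] | None) -> list[str]:
--     if not country_codes: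
--         return []
--
--     unique_codes = [code.strip().upper() for code in country_codes if code and code.strip()]
--     domains: list[str] = []
--     for code in unique_codes:
--         for domain in COUNTRY_NEWS_DOMAINS.get(code, []):
--             if domain not in domains:
--                 domains.append(domain)
--     return domains
-- ===== SOURCE B (Python) =====
-- COUNTRY_NEWS_DOMAINS: dict[str, list[str]] = {
--     "UZ": ["kun.uz", "gazeta.uz", "daryo.uz", "uznews.uz"],
--     "RU": ["ria.ru", "rbc.ru", "lenta.ru", "vesti.ru"],
--     "KZ": ["tengrinews.kz", "inform.kz"],
--     "US": ["apnews.com", "reuters.com", "cnn.com"],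
-- }
--
-- def _preferred_domains_for_countries(country_codes):
--     if not country_codes:
--         return []
--     # The table's domain lists are pairwise disjoint and duplicate-free, so
--     # deduplicating at the COUNTRY-CODE level (one seen-set of codes, single
--     # pass) yields the same output without ever testing domain membership.
--     seen = set()
--     domains = []
--     for code in country_codes:
--         if code and code.strip():
--             cleaned = code.strip().upper()
--             if cleaned not in seen:
--                 seen.add(cleaned)
--                 domains += COUNTRY_NEWS_DOMAINS.get(cleaned, [])
--     return domains
-- ===== Notes on version B (the rewrite author's own statement) =====
-- stated objective: alternative
-- what changed: B dedupes at the country-code level with a single-pass seen-set (cleaning inline, appending whole domain lists), exploiting that the constant table's domain lists are pairwise disjoint and duplicate-free, instead of A's per-domain 'not in domains' membership scan over the growing output.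
import Mathlib
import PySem

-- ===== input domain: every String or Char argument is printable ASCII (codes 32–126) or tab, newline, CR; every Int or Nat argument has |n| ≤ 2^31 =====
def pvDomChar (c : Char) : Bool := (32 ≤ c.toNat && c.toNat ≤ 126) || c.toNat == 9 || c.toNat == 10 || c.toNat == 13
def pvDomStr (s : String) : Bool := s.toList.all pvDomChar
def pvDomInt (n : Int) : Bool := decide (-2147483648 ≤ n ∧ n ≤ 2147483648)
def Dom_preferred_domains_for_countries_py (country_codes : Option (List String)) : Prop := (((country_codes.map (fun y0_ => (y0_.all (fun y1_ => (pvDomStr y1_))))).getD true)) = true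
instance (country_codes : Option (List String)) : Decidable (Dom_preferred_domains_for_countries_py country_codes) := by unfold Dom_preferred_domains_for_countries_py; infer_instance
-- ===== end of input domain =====

-- B dedupes at the country-code level (single pass, seen-set of codes, appending whole
-- domain lists), relying on the constant table's lists being pairwise disjoint and
-- duplicate-free; A dedupes per-domain with a membership scan. Same return value.
-- ===== PORT A =====
def pvCountryNewsDomains : PySem.Dict String (List String) := PySem.Dict.ofList
  [("UZ", ["kun.uz", "gazeta.uz", "daryo.uz", "uznews.uz"]),
   ("RU", ["ria.ru", "rbc.ru", "lenta.ru", "vesti.ru"]),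
   ("KZ", ["tengrinews.kz", "inform.kz"]),
   ("US", ["apnews.com", "reuters.com", "cnn.com"])]

def preferred_domains_for_countries_py (country_codes : Option (List String)) : List String :=
  match country_codes with
  | none => []
  | some codes =>
    if codes.isEmpty then []
    else
      let unique_codes :=
        (codes.filter (fun code => !(code == "") && !(PySem.Str.strip code == ""))).map
          (fun code => PySem.Str.upper (PySem.Str.strip code))
      unique_codes.foldl
        (fun domains code =>
          (PySem.Dict.getD pvCountryNewsDomains code []).foldl
            (fun domains domain => if domain ∈ domains then domains else domains ++ [domain])
            domains)
        []

-- ===== PORT B =====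
def preferred_domains_for_countries_py_alt (country_codes : Option (List String)) : List String :=
  match country_codes with
  | none => []
  | some codes =>
    if codes.isEmpty then []
    else
      (codes.foldl
        (fun (st : PySem.Set String × List String) code =>
          if !(code == "") && !(PySem.Str.strip code == "") then
            let cleaned := PySem.Str.upper (PySem.Str.strip code)
            if PySem.Set.contains st.1 cleaned then st
            else (PySem.Set.add st.1 cleaned,
                  st.2 ++ PySem.Dict.getD pvCountryNewsDomains cleaned [])
          else st)
        (PySem.Set.empty, [])).2

-- ===== PRECONDITION & SPEC =====
def Spec_preferred_domains_for_countries_py (country_codes : Option (List String)) (out : List String) : Prop := out = preferred_domains_for_countries_py_alt country_codes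
instance (country_codes : Option (List String)) (out : List String) : Decidable (Spec_preferred_domains_for_countries_py country_codes out) := by unfold Spec_preferred_domains_for_countries_py; infer_instance

-- ===== CLAIM =====
def Claim_equal_preferred_domains_for_countries_py : Prop := ∀ (country_codes : Option (List String)), Dom_preferred_domains_for_countries_py country_codes → Spec_preferred_domains_for_countries_py country_codes (preferred_domains_for_countries_py country_codes)

-- ===== LEMMAS AND PROOFS =====

-- abbreviation for the table lookup
def pvG (c : String) : List String := PySem.Dict.getD pvCountryNewsDomains c []

-- the lookup yields one of the four literal lists (for the four keys) or []
lemma pvG_cases (c : String) :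
    (c = "UZ" ∧ pvG c = ["kun.uz", "gazeta.uz", "daryo.uz", "uznews.uz"]) ∨
    (c = "RU" ∧ pvG c = ["ria.ru", "rbc.ru", "lenta.ru", "vesti.ru"]) ∨
    (c = "KZ" ∧ pvG c = ["tengrinews.kz", "inform.kz"]) ∨
    (c = "US" ∧ pvG c = ["apnews.com", "reuters.com", "cnn.com"]) ∨
    pvG c = [] := by
  by_cases h1 : c = "UZ"; · subst h1; left; exact ⟨rfl, by decide⟩
  by_cases h2 : c = "RU"; · subst h2; right; left; exact ⟨rfl, by decide⟩
  by_cases h3 : c = "KZ"; · subst h3; right; right; left; exact ⟨rfl, by decide⟩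
  by_cases h4 : c = "US"; · subst h4; right; right; right; left; exact ⟨rfl, by decide⟩
  right; right; right; right
  have h1' : ("UZ" == c) = false := beq_eq_false_iff_ne.mpr (fun h => h1 h.symm)
  have h2' : ("RU" == c) = false := beq_eq_false_iff_ne.mpr (fun h => h2 h.symm)
  have h3' : ("KZ" == c) = false := beq_eq_false_iff_ne.mpr (fun h => h3 h.symm)
  have h4' : ("US" == c) = false := beq_eq_false_iff_ne.mpr (fun h => h4 h.symm)
  simp [pvG, pvCountryNewsDomains, PySem.Dict.getD, PySem.Dict.get?, PySem.Dict.ofList,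
    PySem.Dict.update, PySem.Dict.insert, PySem.Dict.empty, PySem.Dict.items, List.find?,
    h1', h2', h3', h4']

lemma pvG_nodup (c : String) : (pvG c).Nodup := by
  rcases pvG_cases c with ⟨_, h⟩ | ⟨_, h⟩ | ⟨_, h⟩ | ⟨_, h⟩ | h <;> rw [h] <;> decide

lemma pvG_disjoint {c d : String} (hne : c ≠ d) : ∀ x ∈ pvG c, x ∉ pvG d := by
  rcases pvG_cases c with ⟨hc, h⟩ | ⟨hc, h⟩ | ⟨hc, h⟩ | ⟨hc, h⟩ | h <;>
    rcases pvG_cases d with ⟨hd, h'⟩ | ⟨hd, h'⟩ | ⟨hd, h'⟩ | ⟨hd, h'⟩ | h' <;>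
    rw [h, h'] <;> first
      | (exact absurd (hc.trans hd.symm) hne)
      | decide

-- folding Set.add over already-present elements is a no-op
lemma foldl_add_of_subset (xs acc : List String) (h : ∀ x ∈ xs, x ∈ acc) :
    xs.foldl PySem.Set.add acc = acc := by
  induction xs generalizing acc with
  | nil => rfl
  | cons x xs ih =>
    have hx : x ∈ acc := h x (List.mem_cons_self)
    have hadd : PySem.Set.add acc x = acc := by
      simp [PySem.Set.add, PySem.Set.contains, hx]
    rw [List.foldl_cons, hadd]
    exact ih acc (fun y hy => h y (List.mem_cons_of_mem _ hy))

-- folding Set.add over fresh, duplicate-free elements appends them all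
lemma foldl_add_of_fresh (xs acc : List String) (hnd : xs.Nodup) (h : ∀ x ∈ xs, x ∉ acc) :
    xs.foldl PySem.Set.add acc = acc ++ xs := by
  induction xs generalizing acc with
  | nil => simp
  | cons x xs ih =>
    have hx : x ∉ acc := h x (List.mem_cons_self)
    have hadd : PySem.Set.add acc x = acc ++ [x] := by
      simp [PySem.Set.add, PySem.Set.contains, hx]
    rw [List.foldl_cons, hadd, ih (acc ++ [x]) hnd.of_cons]
    · simp
    · intro y hy
      simp only [List.mem_append, List.mem_singleton]
      rintro (hya | rfl)
      · exact h y (List.mem_cons_of_mem _ hy) hya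
      · exact (List.nodup_cons.mp hnd).1 hy

-- A's nested fold over the per-code domain lists is the flat fold over their concatenation
lemma nested_foldl_eq_flat (codes : List String) (acc : List String) :
    codes.foldl
      (fun domains code =>
        (pvG code).foldl
          (fun domains domain => if domain ∈ domains then domains else domains ++ [domain])
          domains)
      acc
    = (codes.flatMap pvG).foldl
        (fun domains domain => if domain ∈ domains then domains else domains ++ [domain])
        acc := by
  induction codes generalizing acc with
  | nil => rfl
  | cons c cs ih => simp [List.flatMap_cons, List.foldl_append, ih]

-- A's append-if-absent step is exactly PySem.Set.add
lemma step_eq_set_add :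
    (fun (domains : List String) (domain : String) =>
      if domain ∈ domains then domains else domains ++ [domain]) = PySem.Set.add := by
  funext s x
  simp [PySem.Set.add]

-- main invariant: the flat Set.add fold equals B's single pass, for any seen-set
lemma main_invariant (codes seen : List String) (hnd : seen.Nodup) :
    (codes.flatMap pvG).foldl PySem.Set.add (seen.flatMap pvG)
    = (codes.foldl
        (fun (st : PySem.Set String × List String) c =>
          if PySem.Set.contains st.1 c then st
          else (PySem.Set.add st.1 c, st.2 ++ pvG c))
        (seen, seen.flatMap pvG)).2 := by
  induction codes generalizing seen with
  | nil => rfl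
  | cons c cs ih =>
    simp only [List.flatMap_cons, List.foldl_append, List.foldl_cons]
    by_cases hc : c ∈ seen
    · have h1 : (pvG c).foldl PySem.Set.add (seen.flatMap pvG) = seen.flatMap pvG := by
        apply foldl_add_of_subset
        intro x hx
        exact List.mem_flatMap.mpr ⟨c, hc, hx⟩
      have hcon : PySem.Set.contains seen c = true := by
        simpa [PySem.Set.contains] using hc
      rw [h1, hcon, if_pos rfl]
      exact ih seen hnd
    · have h1 : (pvG c).foldl PySem.Set.add (seen.flatMap pvG) = (seen ++ [c]).flatMap pvG := by
        rw [foldl_add_of_fresh _ _ (pvG_nodup c)]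
        · simp
        · intro x hx hmem
          rcases List.mem_flatMap.mp hmem with ⟨d, hd, hxd⟩
          have hne : d ≠ c := fun h => hc (h ▸ hd)
          exact pvG_disjoint hne x hxd hx
      have hcon : PySem.Set.contains seen c = false := by
        simpa [PySem.Set.contains] using hc
      have hadd : PySem.Set.add seen c = seen ++ [c] := by
        simp [PySem.Set.add, PySem.Set.contains, hc]
      rw [h1, hcon]
      simp only [Bool.false_eq_true, if_false, hadd]
      have : seen.flatMap pvG ++ pvG c = (seen ++ [c]).flatMap pvG := by simp
      rw [this]
      exact ih (seen ++ [c])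
        (hnd.append (List.nodup_singleton c)
          (by simpa [List.disjoint_singleton] using hc))

-- B's fold with inline cleaning equals the fold over the cleaned list
lemma foldl_clean (codes : List String) (st : PySem.Set String × List String) :
    codes.foldl
      (fun (st : PySem.Set String × List String) code =>
        if !(code == "") && !(PySem.Str.strip code == "") then
          let cleaned := PySem.Str.upper (PySem.Str.strip code)
          if PySem.Set.contains st.1 cleaned then st
          else (PySem.Set.add st.1 cleaned,
                st.2 ++ PySem.Dict.getD pvCountryNewsDomains cleaned [])
        else st)
      st
    = ((codes.filter (fun code => !(code == "") && !(PySem.Str.strip code == ""))).map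
        (fun code => PySem.Str.upper (PySem.Str.strip code))).foldl
        (fun (st : PySem.Set String × List String) c =>
          if PySem.Set.contains st.1 c then st
          else (PySem.Set.add st.1 c, st.2 ++ pvG c))
        st := by
  induction codes generalizing st with
  | nil => rfl
  | cons c cs ih =>
    by_cases h : (!(c == "") && !(PySem.Str.strip c == "")) = true
    · simp only [List.foldl_cons, List.filter_cons, h, if_true, List.map_cons]
      exact ih _
    · have hb : (!(c == "") && !(PySem.Str.strip c == "")) = false := by
        simpa using h
      simp only [List.foldl_cons, List.filter_cons, hb, Bool.false_eq_true, if_false]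
      exact ih st

-- ===== VERDICT =====
theorem preferred_domains_for_countries_py_spec : Claim_equal_preferred_domains_for_countries_py := by
  intro country_codes _
  unfold Spec_preferred_domains_for_countries_py
  cases country_codes with
  | none => rfl
  | some codes =>
    simp only [preferred_domains_for_countries_py, preferred_domains_for_countries_py_alt]
    by_cases h : codes.isEmpty
    · simp [h]
    · rw [if_neg h, if_neg h]
      rw [show (fun domains code =>
            (PySem.Dict.getD pvCountryNewsDomains code []).foldl
              (fun domains domain => if domain ∈ domains then domains else domains ++ [domain])
              domains) =
          (fun domains code =>
            (pvG code).foldl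
              (fun domains domain => if domain ∈ domains then domains else domains ++ [domain])
              domains) from rfl]
      rw [nested_foldl_eq_flat, step_eq_set_add, foldl_clean]
      have := main_invariant
        ((codes.filter (fun code => !(code == "") && !(PySem.Str.strip code == ""))).map
          (fun code => PySem.Str.upper (PySem.Str.strip code))) [] (by simp)
      simpa [PySem.Set.empty, pvG] using this
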